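-- pv_equiv track=rewrite | github.com/yazan6546/Job-Shop-Scheduling-Using-Genetic-Algorithm | Driver.py | get_occurrence_tuples
-- ===== SOURCE A (Python) =====
-- def get_occurrence_tuples(array):
--     """
--     Generate tuples of elements and their current occurrences as encountered in the array.
--
--     Parameters:
--     ----------
--     array : list
--         A list of elements.
--
--     Returns:
--     -------
--     list of tuples
--         A list where each tuple contains an element from the array and its count at that point in the iteration.
--     """
--
--     # Dictionary to keep track of occurrences
--     occurrence_dict = {}
--     # List to store the result tuples
--     result = []
--
--     # Iterate through the array
--     for num in array:
--         # Update the occurrence count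
--         if num in occurrence_dict:
--             occurrence_dict[num] += 1
--         else:
--             occurrence_dict[num] = 1
--
--         # Append the current number and its count to the result list
--         result.append((num, occurrence_dict[num]))
--
--     return result
-- ===== SOURCE B (Python) =====
-- def get_occurrence_tuples(array):
--     """Pair each element with its running occurrence count.
--
--     Two passes: first total counts, then walk the array backwards,
--     emitting the remaining count for each element and decrementing it,
--     building the result back-to-front.
--     """
--     remaining = {}
--     for x in array:
--         remaining[x] = remaining.get(x, 0) + 1
--     result = []
--     for x in reversed(array):
--         result.append((x, remaining[x]))
--         remaining[x] -= 1
--     result.reverse()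
--     return result
-- ===== Notes on version B (the rewrite author's own statement) =====
-- stated objective: alternative
-- what changed: Instead of one forward pass incrementing a running-occurrence dict, B counts total occurrences first and then walks the array in reverse, emitting each element's remaining count and decrementing it, building the output back-to-front.
import Mathlib
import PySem

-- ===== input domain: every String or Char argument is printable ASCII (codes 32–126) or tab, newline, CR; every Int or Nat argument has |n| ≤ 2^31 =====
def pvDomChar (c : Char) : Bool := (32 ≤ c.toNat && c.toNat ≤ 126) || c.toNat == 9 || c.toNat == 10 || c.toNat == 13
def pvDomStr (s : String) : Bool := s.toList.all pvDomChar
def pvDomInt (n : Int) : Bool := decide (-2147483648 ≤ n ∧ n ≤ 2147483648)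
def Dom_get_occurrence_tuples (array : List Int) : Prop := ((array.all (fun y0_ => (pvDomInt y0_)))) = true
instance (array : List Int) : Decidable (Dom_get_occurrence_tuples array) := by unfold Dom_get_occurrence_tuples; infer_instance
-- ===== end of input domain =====

-- B replaces A's single forward pass with a running-occurrence dict by two passes:
-- count totals first, then walk the array in reverse emitting and decrementing the
-- remaining count, building the output back-to-front (alternative, same cost).


-- ===== PORT A =====
-- for num in array: if num in d: d[num] += 1 else: d[num] = 1; result.append((num, d[num]))
def get_occurrence_tuples (array : List Int) : List (Int × Int) :=
  (array.foldl
    (fun (st : PySem.Dict Int Int × List (Int × Int)) num =>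
      let d := if st.1.contains num then st.1.modify num 0 (· + 1) else st.1.insert num 1
      (d, st.2 ++ [(num, d.getD num 0)]))
    (PySem.Dict.empty, [])).2

-- ===== PORT B =====
-- remaining[x] = remaining.get(x, 0) + 1 for x in array; then for x in reversed(array):
-- result.append((x, remaining[x])); remaining[x] -= 1; result.reverse()
def get_occurrence_tuples_alt (array : List Int) : List (Int × Int) :=
  let remaining := array.foldl (fun (d : PySem.Dict Int Int) x => d.insert x (d.getD x 0 + 1)) PySem.Dict.empty
  let res := (array.reverse.foldl
    (fun (st : PySem.Dict Int Int × List (Int × Int)) x =>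
      (st.1.modify x 0 (· - 1), st.2 ++ [(x, st.1.getD x 0)]))
    (remaining, [])).2
  res.reverse

-- ===== PRECONDITION & SPEC =====
def Spec_get_occurrence_tuples (array : List Int) (out : List (Int × Int)) : Prop := out = get_occurrence_tuples_alt array
instance (array : List Int) (out : List (Int × Int)) : Decidable (Spec_get_occurrence_tuples array out) := by unfold Spec_get_occurrence_tuples; infer_instance

-- ===== CLAIM (what is proved, stated in full; the proofs are below) =====
def Claim_equal_get_occurrence_tuples : Prop := ∀ (array : List Int), Dom_get_occurrence_tuples array → Spec_get_occurrence_tuples array (get_occurrence_tuples array)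

-- ===== LEMMAS AND PROOFS =====

-- canonical answer: element paired with (count in prefix pre) + 1, pre growing left to right
def specFrom (pre rest : List Int) : List (Int × Int) :=
  match rest with
  | [] => []
  | x :: xs => (x, (pre.count x : Int) + 1) :: specFrom (pre ++ [x]) xs

lemma loopA (rest : List Int) : ∀ (pre : List Int) (d : PySem.Dict Int Int) (acc : List (Int × Int)),
    (∀ x, d.getD x 0 = (pre.count x : Int)) →
    (∀ x, d.contains x = decide (x ∈ pre)) →
    (rest.foldl
      (fun (st : PySem.Dict Int Int × List (Int × Int)) num =>
        let d := if st.1.contains num then st.1.modify num 0 (· + 1) else st.1.insert num 1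
        (d, st.2 ++ [(num, d.getD num 0)]))
      (d, acc)).2 = acc ++ specFrom pre rest := by
  induction rest with
  | nil => intro pre d acc _ _; simp [specFrom]
  | cons x xs ih =>
    intro pre d acc hg hc
    simp only [List.foldl_cons]
    by_cases hx : x ∈ pre
    · rw [show (if d.contains x then d.modify x 0 (· + 1) else d.insert x 1) = d.modify x 0 (· + 1) by
        rw [hc x]; simp [hx]]
      rw [ih (pre ++ [x]) _ _
        (by intro y; rw [PySem.Dict.getD_modify]
            by_cases h : y = x
            · simp [h, hg, List.count_append]
            · simp [h, hg, List.count_append, List.count_singleton]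
              exact fun hxy => h hxy.symm)
        (by intro y; rw [PySem.Dict.contains_modify, hc]
            by_cases h : y = x <;> simp [h, hx])]
      rw [specFrom]
      simp [hg x]
    · rw [show (if d.contains x then d.modify x 0 (· + 1) else d.insert x 1) = d.insert x 1 by
        rw [hc x]; simp [hx]]
      rw [ih (pre ++ [x]) _ _
        (by intro y; rw [PySem.Dict.getD_insert, hg]
            by_cases h : y = x
            · simp [h, List.count_append, List.count_eq_zero_of_not_mem hx]
            · simp [h, List.count_append, List.count_singleton]
              omega)
        (by intro y; rw [PySem.Dict.contains_insert, hc]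
            by_cases h : y = x <;> simp [h])]
      rw [specFrom]
      simp [List.count_eq_zero_of_not_mem hx]

-- specFrom grows on the right by the element paired with its full-prefix count
lemma specFrom_concat (q : List Int) : ∀ (p : List Int) (x : Int),
    specFrom p (q ++ [x]) = specFrom p q ++ [(x, ((p ++ q).count x : Int) + 1)] := by
  induction q with
  | nil => intro p x; simp [specFrom]
  | cons y q ih =>
    intro p x
    rw [List.cons_append, specFrom, specFrom, ih (p ++ [y]) x]
    simp

lemma loopB (l : List Int) : ∀ (d : PySem.Dict Int Int) (acc : List (Int × Int)),
    (∀ x, d.getD x 0 = (l.reverse.count x : Int)) →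
    (l.foldl
      (fun (st : PySem.Dict Int Int × List (Int × Int)) x =>
        (st.1.modify x 0 (· - 1), st.2 ++ [(x, st.1.getD x 0)]))
      (d, acc)).2 = acc ++ (specFrom [] l.reverse).reverse := by
  induction l with
  | nil => intro d acc _; simp [specFrom]
  | cons x t ih =>
    intro d acc hd
    simp only [List.foldl_cons]
    rw [ih _ _ (by
      intro y; rw [PySem.Dict.getD_modify]
      by_cases h : y = x
      · subst h
        rw [hd y]; simp [List.count_reverse, List.count_cons]
      · rw [hd y]; simp only [List.count_reverse, List.count_cons]
        have : ¬(x = y) := fun hxy => h hxy.symm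
        simp [h, this])]
    rw [List.reverse_cons, specFrom_concat, List.reverse_append, hd x]
    simp [List.count_reverse, List.count_append, List.count_singleton]

-- ===== VERDICT (by name: the statement is the Claim_ definition above) =====
theorem get_occurrence_tuples_spec : Claim_equal_get_occurrence_tuples := by
  intro array _
  unfold Spec_get_occurrence_tuples
  simp only [get_occurrence_tuples, get_occurrence_tuples_alt]
  rw [loopA array [] PySem.Dict.empty []
    (by intro x; simp [PySem.Dict.getD_empty])
    (by intro x; simp [PySem.Dict.contains_empty])]
  rw [List.nil_append]
  rw [loopB array.reverse _ [] (by
    intro x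
    rw [PySem.Dict.getD_foldl_insert_add_one]
    simp [PySem.Dict.getD_empty])]
  simp
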